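-- pv_equiv track=rewrite | github.com/bheil123/crossplay | crossplay/parallel_eval.py | _get_leave_static
-- ===== SOURCE A (Python) =====
-- def _get_leave_static(rack: str, tiles_used: str) -> str:
--     """Get remaining tiles after playing a move (standalone, no imports)."""
--     rack_list = list(rack.upper())
--     for tile in tiles_used.upper():
--         if tile in rack_list:
--             rack_list.remove(tile)
--         elif '?' in rack_list:
--             rack_list.remove('?')
--     return ''.join(rack_list)
-- ===== SOURCE B (Python) =====
-- def _get_leave_static(rack: str, tiles_used: str) -> str:
--     """Count how many of each tile a move consumes (blanks covering any
--     shortfall), then drop that many first occurrences from the rack."""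
--     rack_up = rack.upper()
--     avail = {}
--     for c in rack_up:
--         avail[c] = avail.get(c, 0) + 1
--     skip = {}
--     for t in tiles_used.upper():
--         if avail.get(t, 0) > 0:
--             avail[t] = avail[t] - 1
--             skip[t] = skip.get(t, 0) + 1
--         elif avail.get('?', 0) > 0:
--             avail['?'] = avail['?'] - 1
--             skip['?'] = skip.get('?', 0) + 1
--     out = []
--     for c in rack_up:
--         if skip.get(c, 0) > 0:
--             skip[c] = skip[c] - 1
--         else:
--             out.append(c)
--     return ''.join(out)
-- ===== Notes on version B (the rewrite author's own statement) =====
-- stated objective: faster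
-- what changed: A repeatedly scans and mutates the rack list (membership test + list.remove per used tile); B counts removals per tile with dict counters (blanks covering shortfalls) and then emits the rack in one pass, skipping the first counted occurrences of each tile.
import Mathlib
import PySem

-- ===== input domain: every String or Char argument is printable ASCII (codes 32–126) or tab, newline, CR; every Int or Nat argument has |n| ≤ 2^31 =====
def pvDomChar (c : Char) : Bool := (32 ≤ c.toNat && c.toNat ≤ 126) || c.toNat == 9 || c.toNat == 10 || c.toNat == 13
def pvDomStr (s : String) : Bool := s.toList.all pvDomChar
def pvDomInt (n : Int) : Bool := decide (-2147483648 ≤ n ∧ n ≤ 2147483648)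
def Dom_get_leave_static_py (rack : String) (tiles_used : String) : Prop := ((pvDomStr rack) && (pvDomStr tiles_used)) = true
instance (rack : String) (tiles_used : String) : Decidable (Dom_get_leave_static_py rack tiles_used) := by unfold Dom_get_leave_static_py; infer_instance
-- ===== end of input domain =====

-- B replaces A's remove-from-list loop (a linear scan of the rack per used tile)
-- by dict counters: count removals per tile (blanks covering shortfalls), then drop that many first occurrences.

-- ===== PORT A =====
-- loop body of A: remove tile from the rack list, else remove a blank
def pvAStep (rl : List Char) (tile : Char) : List Char :=
  if rl.contains tile then (PySem.List.remove? rl tile).getD rl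
  else if rl.contains '?' then (PySem.List.remove? rl '?').getD rl
  else rl

def get_leave_static_py (rack : String) (tiles_used : String) : String :=
  let rack_list := (PySem.Str.upper rack).toList
  let final := (PySem.Str.upper tiles_used).toList.foldl pvAStep rack_list
  String.ofList final  -- ''.join(rack_list) of single characters

-- ===== PORT B =====
-- loop body of B's tiles_used loop: state = (avail, skip) dicts
def pvBUseStep (p : PySem.Dict Char Int × PySem.Dict Char Int) (t : Char) :
    PySem.Dict Char Int × PySem.Dict Char Int :=
  if p.1.getD t 0 > 0 then
    (p.1.insert t (p.1.getD t 0 - 1), p.2.insert t (p.2.getD t 0 + 1))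
  else if p.1.getD '?' 0 > 0 then
    (p.1.insert '?' (p.1.getD '?' 0 - 1), p.2.insert '?' (p.2.getD '?' 0 + 1))
  else p

-- loop body of B's output loop: state = (skip dict, out)
def pvBEmitStep (q : PySem.Dict Char Int × List Char) (c : Char) :
    PySem.Dict Char Int × List Char :=
  if q.1.getD c 0 > 0 then (q.1.insert c (q.1.getD c 0 - 1), q.2)
  else (q.1, q.2 ++ [c])

def get_leave_static_py_alt (rack : String) (tiles_used : String) : String :=
  let rack_up := (PySem.Str.upper rack).toList
  let avail := rack_up.foldl (fun d c => d.insert c (d.getD c 0 + 1))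
    (PySem.Dict.empty : PySem.Dict Char Int)
  let st := (PySem.Str.upper tiles_used).toList.foldl pvBUseStep
    (avail, (PySem.Dict.empty : PySem.Dict Char Int))
  let emit := rack_up.foldl pvBEmitStep (st.2, [])
  String.ofList emit.2  -- ''.join(out)

-- ===== PRECONDITION & SPEC =====
def Spec_get_leave_static_py (rack : String) (tiles_used : String) (out : String) : Prop := out = get_leave_static_py_alt rack tiles_used
instance (rack : String) (tiles_used : String) (out : String) : Decidable (Spec_get_leave_static_py rack tiles_used out) := by unfold Spec_get_leave_static_py; infer_instance

-- ===== CLAIM (what is proved, stated in full; the proofs are below) =====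
def Claim_equal_get_leave_static_py : Prop := ∀ (rack : String) (tiles_used : String), Dom_get_leave_static_py rack tiles_used → Spec_get_leave_static_py rack tiles_used (get_leave_static_py rack tiles_used)

-- ===== LEMMAS AND PROOFS =====

-- abstract counter operations (proof-side only)
def pvDec (f : Char → Nat) (t : Char) : Char → Nat := fun c => if c = t then f t - 1 else f c
def pvInc (h : Char → Nat) (t : Char) : Char → Nat := fun c => if c = t then h t + 1 else h c

theorem pvDec_self (f : Char → Nat) (t : Char) : pvDec f t t = f t - 1 := by simp [pvDec]
theorem pvDec_ne (f : Char → Nat) (t c : Char) (h : c ≠ t) : pvDec f t c = f c := by simp [pvDec, h]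
theorem pvInc_self (h : Char → Nat) (t : Char) : pvInc h t t = h t + 1 := by simp [pvInc]
theorem pvInc_ne (h : Char → Nat) (t c : Char) (hc : c ≠ t) : pvInc h t c = h c := by simp [pvInc, hc]
theorem count_cons_ne (t x : Char) (xs : List Char) (h : x ≠ t) :
    (x :: xs).count t = xs.count t := by simp [h]

-- the sublist of xs keeping, for each character c, its LAST (f c) occurrences
def pvSuffKeep : List Char → (Char → Nat) → List Char
  | [], _ => []
  | x :: xs, f => if (x :: xs).count x ≤ f x then x :: pvSuffKeep xs f else pvSuffKeep xs f

-- drop, for each character c, the FIRST (s c) occurrences of c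
def pvDropSkip : List Char → (Char → Nat) → List Char
  | [], _ => []
  | x :: xs, s => if 0 < s x then pvDropSkip xs (pvDec s x) else x :: pvDropSkip xs s

-- abstract counter step of the tiles_used loop: consume t if available, else a blank
def pvG (f : Char → Nat) (t : Char) : Char → Nat :=
  if 0 < f t then pvDec f t else if 0 < f '?' then pvDec f '?' else f

-- abstract version of B's tiles_used loop step on a pair of counters (avail, skip)
def pvStep (p : (Char → Nat) × (Char → Nat)) (t : Char) : (Char → Nat) × (Char → Nat) :=
  if 0 < p.1 t then (pvDec p.1 t, pvInc p.2 t)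
  else if 0 < p.1 '?' then (pvDec p.1 '?', pvInc p.2 '?') else p

theorem pvSuffKeep_all (xs : List Char) (f : Char → Nat)
    (h : ∀ c, xs.count c ≤ f c) : pvSuffKeep xs f = xs := by
  induction xs with
  | nil => rfl
  | cons x xs ih =>
    rw [pvSuffKeep, if_pos (h x)]
    rw [ih (fun c => le_trans List.count_le_count_cons (h c))]

theorem pvMem_suffKeep (xs : List Char) (f : Char → Nat) (t : Char) :
    t ∈ pvSuffKeep xs f ↔ t ∈ xs ∧ 0 < f t := by
  induction xs with
  | nil => simp [pvSuffKeep]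
  | cons x xs ih =>
    rw [pvSuffKeep]
    by_cases hc : (x :: xs).count x ≤ f x
    · rw [if_pos hc]
      simp only [List.mem_cons, ih]
      constructor
      · rintro (rfl | ⟨hm, hp⟩)
        · exact ⟨Or.inl rfl, lt_of_lt_of_le (by simp [List.count_cons_self]) hc⟩
        · exact ⟨Or.inr hm, hp⟩
      · rintro ⟨rfl | hm, hp⟩
        · exact Or.inl rfl
        · exact Or.inr ⟨hm, hp⟩
    · rw [if_neg hc]
      rw [ih]
      constructor
      · rintro ⟨hm, hp⟩; exact ⟨List.mem_cons_of_mem x hm, hp⟩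
      · rintro ⟨h1, hp⟩
        rcases List.mem_cons.mp h1 with rfl | hm
        · refine ⟨?_, hp⟩
          have h2 : (t :: xs).count t = xs.count t + 1 := List.count_cons_self
          have : 0 < xs.count t := by omega
          exact List.count_pos_iff.mp this
        · exact ⟨hm, hp⟩

theorem pvSuffKeep_congr (xs : List Char) (f g : Char → Nat)
    (h : ∀ c, min (f c) (xs.count c) = min (g c) (xs.count c)) :
    pvSuffKeep xs f = pvSuffKeep xs g := by
  induction xs with
  | nil => rfl
  | cons x xs ih =>
    have hx := h x
    have hcond : ((x :: xs).count x ≤ f x) ↔ ((x :: xs).count x ≤ g x) := by omega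
    have ih' : pvSuffKeep xs f = pvSuffKeep xs g := by
      refine ih (fun c => ?_)
      have := h c
      have : List.count c xs ≤ List.count c (x :: xs) := List.count_le_count_cons
      omega
    rw [pvSuffKeep, pvSuffKeep, ih']
    by_cases hc : (x :: xs).count x ≤ f x
    · rw [if_pos hc, if_pos (hcond.mp hc)]
    · rw [if_neg hc, if_neg (fun hg => hc (hcond.mpr hg))]

theorem pvSuffKeep_erase (xs : List Char) (f : Char → Nat) (t : Char) :
    t ∈ xs → 0 < f t → f t ≤ xs.count t →
    (pvSuffKeep xs f).erase t = pvSuffKeep xs (pvDec f t) := by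
  induction xs with
  | nil => intro hm; simp at hm
  | cons x xs ih =>
    intro hm hp hle
    by_cases hxt : x = t
    · subst hxt
      have hcs : (x :: xs).count x = xs.count x + 1 := List.count_cons_self
      have hdx : pvDec f x x = f x - 1 := pvDec_self f x
      by_cases hc : (x :: xs).count x ≤ f x
      · have hfx : f x = (x :: xs).count x := le_antisymm hle hc
        rw [pvSuffKeep, if_pos hc, List.erase_cons_head, pvSuffKeep, if_neg (by omega)]
        refine pvSuffKeep_congr xs f (pvDec f x) (fun c => ?_)
        by_cases hcx : c = x
        · subst hcx; rw [pvDec_self]; omega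
        · rw [pvDec_ne _ _ _ hcx]
      · have hmem : x ∈ xs := List.count_pos_iff.mp (by omega)
        rw [pvSuffKeep, if_neg hc, pvSuffKeep, if_neg (by omega)]
        exact ih hmem hp (by omega)
    · have hmem : t ∈ xs := by
        rcases List.mem_cons.mp hm with h' | h'
        · exact absurd h'.symm hxt
        · exact h'
      have hcnt : (x :: xs).count t = xs.count t := count_cons_ne t x xs hxt
      have hdx : pvDec f t x = f x := pvDec_ne _ _ _ hxt
      rw [pvSuffKeep, pvSuffKeep]
      by_cases hc : (x :: xs).count x ≤ f x
      · rw [if_pos hc, if_pos (by omega), List.erase_cons_tail (by simp [hxt])]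
        rw [ih hmem hp (by omega)]
      · rw [if_neg hc, if_neg (by omega)]
        exact ih hmem hp (by omega)

theorem pvDropSkip_eq_suffKeep (xs : List Char) (f : Char → Nat) :
    ∀ s : Char → Nat, (∀ c, s c = xs.count c - f c) → pvDropSkip xs s = pvSuffKeep xs f := by
  induction xs with
  | nil => intro s _; rfl
  | cons x xs ih =>
    intro s hs
    have hcs : (x :: xs).count x = xs.count x + 1 := List.count_cons_self
    rw [pvDropSkip, pvSuffKeep]
    by_cases hp : 0 < s x
    · rw [if_pos hp, if_neg (by have := hs x; omega)]
      refine ih (pvDec s x) (fun c => ?_)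
      by_cases hcx : c = x
      · subst hcx; rw [pvDec_self]; have := hs c; omega
      · rw [pvDec_ne _ _ _ hcx]
        have h1 := hs c
        have h2 : (x :: xs).count c = xs.count c := count_cons_ne c x xs (fun h => hcx h.symm)
        omega
    · rw [if_neg hp, if_pos (by have := hs x; omega)]
      rw [ih s (fun c => ?_)]
      by_cases hcx : c = x
      · subst hcx; have := hs c; omega
      · have h2 : (x :: xs).count c = xs.count c := count_cons_ne c x xs (fun h => hcx h.symm)
        have := hs c; omega

theorem pvG_le (f : Char → Nat) (t c : Char) : pvG f t c ≤ f c := by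
  unfold pvG
  split
  · by_cases hc : c = t
    · subst hc; rw [pvDec_self]; omega
    · rw [pvDec_ne _ _ _ hc]
  · split
    · by_cases hc : c = '?'
      · subst hc; rw [pvDec_self]; omega
      · rw [pvDec_ne _ _ _ hc]
    · exact le_rfl

theorem pvGFold_le (used : List Char) (f : Char → Nat) (c : Char) :
    used.foldl pvG f c ≤ f c := by
  induction used generalizing f with
  | nil => exact le_rfl
  | cons t used ih => exact le_trans (ih (pvG f t)) (pvG_le f t c)

theorem pvAStep_eq (xs : List Char) (f : Char → Nat)
    (hle : ∀ c, f c ≤ xs.count c) (t : Char) :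
    pvAStep (pvSuffKeep xs f) t = pvSuffKeep xs (pvG f t) := by
  have hmem : ∀ c : Char, 0 < f c → c ∈ xs :=
    fun c hc => List.count_pos_iff.mp (lt_of_lt_of_le hc (hle c))
  have hcont : ∀ c : Char, (pvSuffKeep xs f).contains c = true ↔ (c ∈ xs ∧ 0 < f c) := by
    intro c; rw [List.contains_iff_mem, pvMem_suffKeep]
  unfold pvAStep pvG
  by_cases hp : 0 < f t
  · have hin : t ∈ pvSuffKeep xs f := (pvMem_suffKeep xs f t).mpr ⟨hmem t hp, hp⟩
    rw [if_pos ((hcont t).mpr ⟨hmem t hp, hp⟩), if_pos hp]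
    rw [PySem.List.remove?_eq_some_erase _ _ hin, Option.getD_some]
    exact pvSuffKeep_erase xs f t (hmem t hp) hp (hle t)
  · have hnc : ¬ (pvSuffKeep xs f).contains t = true := by
      rw [hcont]; rintro ⟨_, h⟩; exact hp h
    rw [if_neg hnc, if_neg hp]
    by_cases hq : 0 < f '?'
    · have hin : '?' ∈ pvSuffKeep xs f := (pvMem_suffKeep xs f '?').mpr ⟨hmem '?' hq, hq⟩
      rw [if_pos ((hcont '?').mpr ⟨hmem '?' hq, hq⟩), if_pos hq]
      rw [PySem.List.remove?_eq_some_erase _ _ hin, Option.getD_some]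
      exact pvSuffKeep_erase xs f '?' (hmem '?' hq) hq (hle '?')
    · have hnc' : ¬ (pvSuffKeep xs f).contains '?' = true := by
        rw [hcont]; rintro ⟨_, h⟩; exact hq h
      rw [if_neg hnc', if_neg hq]

theorem pvAFold (xs : List Char) (used : List Char) (f : Char → Nat)
    (hle : ∀ c, f c ≤ xs.count c) :
    used.foldl pvAStep (pvSuffKeep xs f) = pvSuffKeep xs (used.foldl pvG f) := by
  induction used generalizing f with
  | nil => rfl
  | cons t used ih =>
    rw [List.foldl_cons, List.foldl_cons, pvAStep_eq xs f hle t]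
    exact ih (pvG f t) (fun c => le_trans (pvG_le f t c) (hle c))

theorem pvStepFold_fst (used : List Char) (f h : Char → Nat) :
    (used.foldl pvStep (f, h)).1 = used.foldl pvG f := by
  induction used generalizing f h with
  | nil => rfl
  | cons t used ih =>
    rw [List.foldl_cons, List.foldl_cons]
    have hstep : pvStep (f, h) t = (pvG f t, (pvStep (f, h) t).2) := by
      unfold pvStep pvG; split
      · rfl
      · split <;> rfl
    rw [hstep, ih]

theorem pvStepFold_sum (used : List Char) (f h : Char → Nat) (c : Char) :
    (used.foldl pvStep (f, h)).1 c + (used.foldl pvStep (f, h)).2 c = f c + h c := by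
  induction used generalizing f h with
  | nil => rfl
  | cons t used ih =>
    rw [List.foldl_cons]
    have hpres : ∀ p : (Char → Nat) × (Char → Nat),
        (pvStep p t).1 c + (pvStep p t).2 c = p.1 c + p.2 c := by
      intro p
      unfold pvStep
      split
      · by_cases hc : c = t
        · subst hc; simp only; rw [pvDec_self, pvInc_self]; omega
        · simp only; rw [pvDec_ne _ _ _ hc, pvInc_ne _ _ _ hc]
      · split
        · by_cases hc : c = '?'
          · subst hc; simp only; rw [pvDec_self, pvInc_self]; omega
          · simp only; rw [pvDec_ne _ _ _ hc, pvInc_ne _ _ _ hc]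
        · rfl
    rcases hps : pvStep (f, h) t with ⟨f', h'⟩
    have := hpres (f, h)
    rw [hps] at this
    rw [ih f' h', this]

theorem pvBUseFold (used : List Char) :
    ∀ (d s : PySem.Dict Char Int) (f h : Char → Nat),
    (∀ c, d.getD c 0 = (f c : Int)) → (∀ c, s.getD c 0 = (h c : Int)) →
    (∀ c, (used.foldl pvBUseStep (d, s)).1.getD c 0 = ((used.foldl pvStep (f, h)).1 c : Int))
    ∧ (∀ c, (used.foldl pvBUseStep (d, s)).2.getD c 0 = ((used.foldl pvStep (f, h)).2 c : Int)) := by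
  induction used with
  | nil => intro d s f h hd hs; exact ⟨hd, hs⟩
  | cons t used ih =>
    intro d s f h hd hs
    rw [List.foldl_cons, List.foldl_cons]
    by_cases hp : 0 < f t
    · have hdp : d.getD t 0 > 0 := by rw [hd t]; exact_mod_cast hp
      have hB : pvBUseStep (d, s) t
          = (d.insert t (d.getD t 0 - 1), s.insert t (s.getD t 0 + 1)) := by
        unfold pvBUseStep; rw [if_pos hdp]
      have hS : pvStep (f, h) t = (pvDec f t, pvInc h t) := by
        unfold pvStep; rw [if_pos hp]
      rw [hB, hS]
      refine ih _ _ _ _ (fun c => ?_) (fun c => ?_)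
      · rw [PySem.Dict.getD_insert]
        by_cases hc : c = t
        · subst hc; rw [if_pos rfl, pvDec_self, hd c]; omega
        · rw [if_neg hc, pvDec_ne _ _ _ hc, hd c]
      · rw [PySem.Dict.getD_insert]
        by_cases hc : c = t
        · subst hc; rw [if_pos rfl, pvInc_self, hs c]; omega
        · rw [if_neg hc, pvInc_ne _ _ _ hc, hs c]
    · have hdp : ¬ d.getD t 0 > 0 := by rw [hd t]; exact_mod_cast hp
      by_cases hq : 0 < f '?'
      · have hdq : d.getD '?' 0 > 0 := by rw [hd '?']; exact_mod_cast hq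
        have hB : pvBUseStep (d, s) t
            = (d.insert '?' (d.getD '?' 0 - 1), s.insert '?' (s.getD '?' 0 + 1)) := by
          unfold pvBUseStep; rw [if_neg hdp, if_pos hdq]
        have hS : pvStep (f, h) t = (pvDec f '?', pvInc h '?') := by
          unfold pvStep; rw [if_neg hp, if_pos hq]
        rw [hB, hS]
        refine ih _ _ _ _ (fun c => ?_) (fun c => ?_)
        · rw [PySem.Dict.getD_insert]
          by_cases hc : c = '?'
          · subst hc; rw [if_pos rfl, pvDec_self, hd '?']; omega
          · rw [if_neg hc, pvDec_ne _ _ _ hc, hd c]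
        · rw [PySem.Dict.getD_insert]
          by_cases hc : c = '?'
          · subst hc; rw [if_pos rfl, pvInc_self, hs '?']; omega
          · rw [if_neg hc, pvInc_ne _ _ _ hc, hs c]
      · have hdq : ¬ d.getD '?' 0 > 0 := by rw [hd '?']; exact_mod_cast hq
        have hB : pvBUseStep (d, s) t = (d, s) := by
          unfold pvBUseStep; rw [if_neg hdp, if_neg hdq]
        have hS : pvStep (f, h) t = (f, h) := by
          unfold pvStep; rw [if_neg hp, if_neg hq]
        rw [hB, hS]
        exact ih _ _ _ _ hd hs

theorem pvBEmitFold (xs : List Char) :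
    ∀ (d : PySem.Dict Char Int) (s : Char → Nat) (out : List Char),
    (∀ c, d.getD c 0 = (s c : Int)) →
    (xs.foldl pvBEmitStep (d, out)).2 = out ++ pvDropSkip xs s := by
  induction xs with
  | nil => intro d s out _; simp [pvDropSkip]
  | cons x xs ih =>
    intro d s out hd
    rw [List.foldl_cons, pvDropSkip]
    by_cases hp : 0 < s x
    · have hdp : d.getD x 0 > 0 := by rw [hd x]; exact_mod_cast hp
      have hB : pvBEmitStep (d, out) x = (d.insert x (d.getD x 0 - 1), out) := by
        unfold pvBEmitStep; rw [if_pos hdp]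
      rw [hB, if_pos hp]
      refine ih _ (pvDec s x) out (fun c => ?_)
      rw [PySem.Dict.getD_insert]
      by_cases hc : c = x
      · subst hc; rw [if_pos rfl, pvDec_self, hd c]; omega
      · rw [if_neg hc, pvDec_ne _ _ _ hc, hd c]
    · have hdp : ¬ d.getD x 0 > 0 := by rw [hd x]; exact_mod_cast hp
      have hB : pvBEmitStep (d, out) x = (d, out ++ [x]) := by
        unfold pvBEmitStep; rw [if_neg hdp]
      rw [hB, if_neg hp, ih d s (out ++ [x]) hd, List.append_assoc, List.singleton_append]

theorem pvCounter_getD (xs : List Char) (c : Char) :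
    (xs.foldl (fun d c => d.insert c (d.getD c 0 + 1))
      (PySem.Dict.empty : PySem.Dict Char Int)).getD c 0 = (xs.count c : Int) := by
  simp [PySem.Dict.getD_foldl_insert_add_one]

-- the whole equivalence on the character lists
theorem pvMain (xs us : List Char) :
    us.foldl pvAStep xs
      = ((xs.foldl pvBEmitStep
          (((us.foldl pvBUseStep
            (xs.foldl (fun d c => d.insert c (d.getD c 0 + 1))
              (PySem.Dict.empty : PySem.Dict Char Int),
             (PySem.Dict.empty : PySem.Dict Char Int))).2), [])).2) := by
  have hcount : ∀ c, (xs.foldl (fun d c => d.insert c (d.getD c 0 + 1))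
      (PySem.Dict.empty : PySem.Dict Char Int)).getD c 0 = ((xs.count c : Nat) : Int) :=
    fun c => pvCounter_getD xs c
  have hzero : ∀ c : Char, (PySem.Dict.empty : PySem.Dict Char Int).getD c 0 = (((fun _ => 0) c : Nat) : Int) := by
    intro c; simp [PySem.Dict.getD_empty]
  have huse := pvBUseFold us _ _ (fun c => xs.count c) (fun _ => 0) hcount hzero
  -- skip counter of B corresponds to count - final avail
  set fF : Char → Nat := us.foldl pvG (fun c => xs.count c) with hfF
  have hsum : ∀ c, (us.foldl pvStep (fun c => xs.count c, fun _ => 0)).2 c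
      = xs.count c - fF c := by
    intro c
    have h1 := pvStepFold_sum us (fun c => xs.count c) (fun _ => 0) c
    have h2 := pvStepFold_fst us (fun c => xs.count c) (fun _ => 0)
    rw [h2] at h1
    have h3 := pvGFold_le us (fun c => xs.count c) c
    rw [← hfF] at h1 h3
    omega
  have hskip : ∀ c, ((us.foldl pvBUseStep
      (xs.foldl (fun d c => d.insert c (d.getD c 0 + 1))
        (PySem.Dict.empty : PySem.Dict Char Int),
       (PySem.Dict.empty : PySem.Dict Char Int))).2).getD c 0
      = ((xs.count c - fF c : Nat) : Int) := by
    intro c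
    rw [huse.2 c, hsum c]
  -- A side
  have hA : us.foldl pvAStep xs = pvSuffKeep xs fF := by
    have h0 : pvSuffKeep xs (fun c => xs.count c) = xs :=
      pvSuffKeep_all xs _ (fun c => le_rfl)
    have h1 := pvAFold xs us (fun c => xs.count c) (fun c => le_rfl)
    rw [h0] at h1
    rw [h1, hfF]
  -- B side
  have hB : (xs.foldl pvBEmitStep
      (((us.foldl pvBUseStep
        (xs.foldl (fun d c => d.insert c (d.getD c 0 + 1))
          (PySem.Dict.empty : PySem.Dict Char Int),
         (PySem.Dict.empty : PySem.Dict Char Int))).2), [])).2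
      = pvDropSkip xs (fun c => xs.count c - fF c) := by
    rw [pvBEmitFold xs _ (fun c => xs.count c - fF c) [] hskip, List.nil_append]
  rw [hA, hB, pvDropSkip_eq_suffKeep xs fF (fun c => xs.count c - fF c) (fun c => rfl)]

-- ===== VERDICT (by name: the statement is the Claim_ definition above) =====
theorem get_leave_static_py_spec : Claim_equal_get_leave_static_py := by
  intro rack tiles_used _
  unfold Spec_get_leave_static_py get_leave_static_py get_leave_static_py_alt
  simp only []
  rw [pvMain ((PySem.Str.upper rack).toList) ((PySem.Str.upper tiles_used).toList)]
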